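-- pv_equiv track=rewrite | github.com/hw725/SP | core/tokenizers.py | split_source_by_whitespace_and_align
-- ===== SOURCE A (Python) =====
-- from typing import List, Callable, Optional
--
-- def split_source_by_whitespace_and_align(source: str, target_count: int) -> List[str]:
--     """Splits the source text based on whitespace to align with the target sentence count."""
--     if not source.strip():
--         return [''] * target_count
--
--     tokens = source.split()
--     if not tokens:
--         return [''] * target_count
--
--     if len(tokens) <= target_count:
--         return tokens + [''] * (target_count - len(tokens))
--     else:
--         # Distribute tokens evenly
--         chunk_size = len(tokens) // target_count
--         remainder = len(tokens) % target_count
--         result = []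
--         start = 0
--         for i in range(target_count):
--             end = start + chunk_size + (1 if i < remainder else 0)
--             result.append(' '.join(tokens[start:end]))
--             start = end
--         return result
-- ===== SOURCE B (Python) =====
-- from typing import List
--
-- def split_source_by_whitespace_and_align(source: str, target_count: int) -> List[str]:
--     """Splits the source text based on whitespace to align with the target sentence count."""
--     tokens = source.split()
--     if len(tokens) <= target_count:
--         return tokens + [''] * (target_count - len(tokens))
--     # Greedy peel: repeatedly take the ceiling share of what is left as the next chunk.
--     result = []
--     k = target_count
--     while k > 0:
--         head = -(-len(tokens) // k)  # ceil(len(tokens) / k)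
--         result.append(' '.join(tokens[:head]))
--         tokens = tokens[head:]
--         k -= 1
--     return result
-- ===== Notes on version B (the rewrite author's own statement) =====
-- stated objective: alternative
-- what changed: B replaces A's precomputed quotient/remainder plus running-start loop by a greedy peel: it repeatedly takes ceil(len(remaining)/chunks_left) tokens off the front as the next chunk, recomputing the ceiling share each step with no chunk_size/remainder variables and no index arithmetic over the full token list; Pre_ excludes only target_count == 0 with a non-whitespace source, where A raises ZeroDivisionError.
import Mathlib
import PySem

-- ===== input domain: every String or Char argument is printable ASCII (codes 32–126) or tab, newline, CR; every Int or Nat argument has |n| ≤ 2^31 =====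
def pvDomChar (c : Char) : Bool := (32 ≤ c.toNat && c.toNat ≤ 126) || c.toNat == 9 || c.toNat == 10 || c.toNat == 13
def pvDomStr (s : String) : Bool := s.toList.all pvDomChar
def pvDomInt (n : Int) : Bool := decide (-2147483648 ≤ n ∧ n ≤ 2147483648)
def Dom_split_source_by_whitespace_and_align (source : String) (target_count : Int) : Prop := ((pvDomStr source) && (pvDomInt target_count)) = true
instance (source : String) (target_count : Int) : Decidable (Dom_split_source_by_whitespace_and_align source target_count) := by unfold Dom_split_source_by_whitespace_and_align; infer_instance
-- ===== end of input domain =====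

-- B peels chunks greedily (ceil(len(remaining)/chunks_left) tokens off the front each step)
-- instead of A's precomputed quotient/remainder with a running-start loop; objective: alternative.
-- Pre_ excludes exactly target_count = 0 with non-whitespace source, where A raises ZeroDivisionError (B returns []).


-- ===== PORT A =====
def split_source_by_whitespace_and_align (source : String) (target_count : Int) : List String :=
  if PySem.Str.strip source = "" then List.replicate target_count.toNat "" else
  let tokens := PySem.Str.split₀ source
  if tokens = [] then List.replicate target_count.toNat "" else
  if (tokens.length : Int) ≤ target_count then
    tokens ++ List.replicate (target_count - tokens.length).toNat ""
  else
    let chunk_size := PySem.Int.floordiv tokens.length target_count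
    let remainder := PySem.Int.mod tokens.length target_count
    let p := (PySem.List.pyRange 0 target_count 1).foldl
      (fun (st : List String × Int) i =>
        let e := st.2 + chunk_size + (if i < remainder then 1 else 0)
        (st.1 ++ [PySem.Str.join " " (PySem.List.slice tokens (some st.2) (some e))], e))
      ([], 0)
    p.1

-- ===== PORT B =====
-- the while loop of Source B: peel ceil(len(toks)/k) tokens off the front while k > 0
def pvPeel (toks : List String) (k : Int) : List String :=
  if h : k ≤ 0 then [] else
    let head := -(PySem.Int.floordiv (-(toks.length : Int)) k)
    PySem.Str.join " " (PySem.List.slice toks none (some head)) ::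
      pvPeel (PySem.List.slice toks (some head) none) (k - 1)
termination_by k.toNat
decreasing_by omega

def split_source_by_whitespace_and_align_alt (source : String) (target_count : Int) : List String :=
  let tokens := PySem.Str.split₀ source
  if (tokens.length : Int) ≤ target_count then
    tokens ++ List.replicate (target_count - tokens.length).toNat ""
  else
    pvPeel tokens target_count

-- ===== PRECONDITION & SPEC =====
-- Pre_ excludes exactly target_count = 0 with non-whitespace source, where A raises ZeroDivisionError.
def Pre_split_source_by_whitespace_and_align (source : String) (target_count : Int) : Prop :=
  target_count ≠ 0 ∨ PySem.Str.strip source = ""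
instance (source : String) (target_count : Int) : Decidable (Pre_split_source_by_whitespace_and_align source target_count) := by unfold Pre_split_source_by_whitespace_and_align; infer_instance

def pvWitness_split_source_by_whitespace_and_align : String × Int := ("a b c", 2)

def Spec_split_source_by_whitespace_and_align (source : String) (target_count : Int) (out : List String) : Prop := out = split_source_by_whitespace_and_align_alt source target_count
instance (source : String) (target_count : Int) (out : List String) : Decidable (Spec_split_source_by_whitespace_and_align source target_count out) := by unfold Spec_split_source_by_whitespace_and_align; infer_instance

-- ===== CLAIM (what is proved, stated in full; the proofs are below) =====
def Claim_equal_split_source_by_whitespace_and_align : Prop := ∀ (source : String) (target_count : Int), Dom_split_source_by_whitespace_and_align source target_count → Pre_split_source_by_whitespace_and_align source target_count → Spec_split_source_by_whitespace_and_align source target_count (split_source_by_whitespace_and_align source target_count)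

-- ===== LEMMAS AND PROOFS =====

-- whitespace-only strings split to no tokens
lemma split₀_go_all_space (s : List Char) (acc : List (List Char))
    (h : ∀ c ∈ s, PySem.Chars.isspace c = true) :
    PySem.Chars.split₀.go s [] acc = acc.reverse := by
  induction s generalizing acc with
  | nil => simp [PySem.Chars.split₀.go]
  | cons c rest ih =>
    have hc := h c (by simp)
    simp [PySem.Chars.split₀.go, hc]
    exact ih acc (fun d hd => h d (by simp [hd]))

lemma split₀_of_strip_empty (source : String) (h : PySem.Str.strip source = "") :
    PySem.Str.split₀ source = [] := by
  have h' : PySem.Chars.strip source.toList = [] := by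
    have := congrArg String.toList h
    simpa [PySem.Str.toList_strip] using this
  have hall : ∀ c ∈ source.toList, PySem.Chars.isspace c = true := by
    have h2 : (List.dropWhile PySem.Chars.isspace
        (List.dropWhile PySem.Chars.isspace source.toList).reverse).reverse = [] := h'
    have h3 : List.dropWhile PySem.Chars.isspace
        (List.dropWhile PySem.Chars.isspace source.toList).reverse = [] := by
      simpa using congrArg List.reverse h2
    have h4 : ∀ c ∈ (List.dropWhile PySem.Chars.isspace source.toList).reverse,
        PySem.Chars.isspace c = true := List.dropWhile_eq_nil_iff.mp h3
    intro c hc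
    have hsplit : c ∈ List.takeWhile PySem.Chars.isspace source.toList ++
        List.dropWhile PySem.Chars.isspace source.toList := by
      rw [List.takeWhile_append_dropWhile]; exact hc
    rcases List.mem_append.mp hsplit with h5 | h5
    · exact List.mem_takeWhile_imp h5
    · exact h4 c (by simpa using h5)
  have hgo : PySem.Chars.split₀ source.toList = [] := by
    simpa [PySem.Chars.split₀] using split₀_go_all_space source.toList [] hall
  simp [PySem.Str.split₀, hgo]

-- the chunking A's loop computes, in recursive form over the size list
def chunksOf (tokens : List String) : List Int → Int → List String
  | [], _ => []
  | sz :: rest, start =>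
      PySem.Str.join " " (PySem.List.slice tokens (some start) (some (start + sz)))
        :: chunksOf tokens rest (start + sz)

lemma a_loop_eq_chunks (tokens : List String) (q r t : Int) (k : Int) (acc : List String) (start : Int) :
    ((PySem.List.pyRange k t 1).foldl
      (fun (st : List String × Int) i =>
        let e := st.2 + q + (if i < r then 1 else 0)
        (st.1 ++ [PySem.Str.join " " (PySem.List.slice tokens (some st.2) (some e))], e))
      (acc, start)).1
    = acc ++ chunksOf tokens ((PySem.List.pyRange k t 1).map (fun i => q + if i < r then 1 else 0)) start := by
  by_cases h : t ≤ k
  · simp [PySem.List.pyRange_one_eq_nil h, chunksOf]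
  · have hlt : k < t := by omega
    rw [PySem.List.pyRange_one_cons hlt]
    simp only [List.foldl_cons, List.map_cons, chunksOf]
    have hrec := a_loop_eq_chunks tokens q r t (k + 1)
      (acc ++ [PySem.Str.join " " (PySem.List.slice tokens (some start) (some (start + q + (if k < r then 1 else 0))))])
      (start + q + (if k < r then 1 else 0))
    rw [hrec]
    simp [List.append_assoc, add_assoc]
termination_by (t - k).toNat
decreasing_by omega

-- the front-loaded size list, in the explicit replicate form
def sizesFor (n k : Int) : List Int :=
  List.replicate (PySem.Int.mod n k).toNat (PySem.Int.floordiv n k + 1) ++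
  List.replicate (k - PySem.Int.mod n k).toNat (PySem.Int.floordiv n k)

lemma sizes_eq_map_range (q r t : Int) (hr0 : 0 ≤ r) (hrt : r ≤ t) :
    (PySem.List.pyRange 0 t 1).map (fun i => q + if i < r then 1 else 0)
    = List.replicate r.toNat (q + 1) ++ List.replicate (t - r).toNat q := by
  rw [PySem.List.pyRange_one_append 0 r t hr0 hrt, List.map_append]
  congr 1
  · rw [List.map_congr_left (g := fun _ => q + 1) ?_]
    · rw [List.map_const']
      congr 1
      rw [PySem.List.length_pyRange_one]; omega
    · intro i hi
      have := (PySem.List.mem_pyRange_one.mp hi).2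
      simp [this]
  · rw [List.map_congr_left (g := fun _ => q) ?_]
    · rw [List.map_const']
      congr 1
      rw [PySem.List.length_pyRange_one]
    · intro i hi
      have := (PySem.List.mem_pyRange_one.mp hi).1
      simp [show ¬ i < r by omega]

-- chunking with a shifted start equals chunking the dropped suffix from 0
lemma chunksOf_shift (sizes : List Int) : ∀ (toks : List String) (d : Int), 0 ≤ d →
    (∀ s ∈ sizes, 0 ≤ s) →
    chunksOf toks sizes d = chunksOf (toks.drop d.toNat) sizes 0 := by
  induction sizes with
  | nil => intro toks d _ _; simp [chunksOf]
  | cons sz rest ih =>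
    intro toks d hd hs
    have hsz : 0 ≤ sz := hs sz (by simp)
    have hrest : ∀ s ∈ rest, 0 ≤ s := fun s hsmem => hs s (by simp [hsmem])
    simp only [chunksOf]
    congr 1
    · have e : (d + sz).toNat - d.toNat = ((0:Int) + sz).toNat - ((0:Int)).toNat := by omega
      rw [PySem.List.slice_toNat toks hd (by omega), PySem.List.slice_toNat _ le_rfl (by omega), e]
      simp
    · rw [ih toks (d + sz) (by omega) hrest, ih (toks.drop d.toNat) (0 + sz) (by omega) hrest]
      congr 1
      rw [List.drop_drop]
      congr 1
      omega

-- the greedy ceiling peel produces exactly the front-loaded size chunks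
lemma peel_eq_chunks : ∀ (m : Nat) (toks : List String) (k : Int), k.toNat = m →
    0 < k → k ≤ (toks.length : Int) →
    pvPeel toks k = chunksOf toks (sizesFor (toks.length : Int) k) 0 := by
  intro m
  induction m with
  | zero => intro toks k hm hk _; omega
  | succ m ih =>
    intro toks k hm hk hkn
    set n : Int := (toks.length : Int) with hn
    have hq : PySem.Int.floordiv n k * k + PySem.Int.mod n k = n := PySem.Int.floordiv_mul_add_mod n k
    set q : Int := PySem.Int.floordiv n k with hqdef
    set r : Int := PySem.Int.mod n k with hrdef
    have hr0 : 0 ≤ r := PySem.Int.mod_nonneg n hk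
    have hrk : r < k := PySem.Int.mod_lt n hk
    have hq1 : 1 ≤ q := by
      rw [hqdef, PySem.Int.le_floordiv_iff_mul_le hk, one_mul]
      exact hkn
    -- the ceiling head
    have hceil : PySem.Int.floordiv (-n) k = -(q + (if 0 < r then 1 else 0)) := by
      rw [PySem.Int.floordiv_eq_iff_of_pos hk]
      by_cases hrpos : 0 < r
      · rw [if_pos hrpos]
        have e1 : -(q + 1) * k = -(q * k) - k := by ring
        have e2 : (-(q + 1) + 1) * k = -(q * k) := by ring
        omega
      · rw [if_neg hrpos]
        have e1 : -(q + 0) * k = -(q * k) := by ring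
        have e2 : (-(q + 0) + 1) * k = -(q * k) + k := by ring
        omega
    have hhead : -(PySem.Int.floordiv (-n) k) = q + (if 0 < r then 1 else 0) := by
      rw [hceil]; ring
    set h : Int := q + (if 0 < r then 1 else 0) with hhdef
    have hh0 : 0 ≤ h := by rw [hhdef]; split_ifs <;> omega
    have hhn : h ≤ n := by
      rw [hhdef]
      by_cases hk1 : k = 1
      · have : r = 0 := by omega
        rw [hk1] at hq
        simp [this]
        omega
      · have hk2 : 2 ≤ k := by omega
        have : q * 2 ≤ q * k := by
          apply mul_le_mul_of_nonneg_left hk2 (by omega)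
        split_ifs <;> omega
    rw [pvPeel]
    rw [dif_neg (by omega)]
    simp only
    rw [hhead]
    rw [PySem.List.slice_from toks hh0]
    -- rhs: split off the head size
    have hsizes : sizesFor n k = h :: (List.replicate (if 0 < r then (r-1).toNat else 0) (q + 1) ++ List.replicate (if 0 < r then (k - r).toNat else (k-1).toNat) q) := by
      rw [sizesFor, ← hqdef, ← hrdef, hhdef]
      by_cases hrpos : 0 < r
      · simp only [if_pos hrpos]
        rw [show r.toNat = (r-1).toNat + 1 by omega, List.replicate_succ]
        simp
      · simp only [if_neg hrpos]
        have hr00 : r = 0 := by omega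
        rw [hr00]
        simp only [List.replicate_zero, List.nil_append, sub_zero, add_zero]
        rw [show k.toNat = (k-1).toNat + 1 by omega, List.replicate_succ]
        simp
    rw [hsizes]
    simp only [chunksOf, zero_add]
    refine congrArg₂ List.cons ?_ ?_
    · rw [PySem.List.slice_zero_start]
    set rest : List Int := List.replicate (if 0 < r then (r-1).toNat else 0) (q + 1) ++ List.replicate (if 0 < r then (k - r).toNat else (k-1).toNat) q with hrestdef
    have hrestpos : ∀ s ∈ rest, 0 ≤ s := by
      intro s hsmem
      rw [hrestdef] at hsmem
      rcases List.mem_append.mp hsmem with h5 | h5 <;>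
        rw [List.eq_of_mem_replicate h5] <;> omega
    rw [chunksOf_shift rest toks h hh0 hrestpos]
    by_cases hk1 : k = 1
    · -- k = 1: both sides are the empty chunk list
      have hrpos : ¬ 0 < r := by omega
      have : rest = [] := by
        rw [hrestdef, if_neg hrpos, if_neg hrpos]
        simp [show (k - (1:Int)).toNat = 0 by omega]
      rw [this]
      rw [pvPeel]
      rw [dif_pos (by omega)]
      simp [chunksOf]
    · -- k ≥ 2: identify rest with sizesFor of the dropped suffix and recurse
      have hk2 : 2 ≤ k := by omega
      have hlen : ((toks.drop h.toNat).length : Int) = n - h := by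
        simp
        omega
      -- floordiv/mod of the remaining tokens
      have hq'eq : PySem.Int.floordiv (n - h) (k - 1) = q := by
        rw [PySem.Int.floordiv_eq_iff_of_pos (show (0:Int) < k - 1 by omega)]
        have e1 : q * (k - 1) = q * k - q := by ring
        have e2 : (q + 1) * (k - 1) = q * k - q + k - 1 := by ring
        rw [hhdef]
        split_ifs with hrpos <;> omega
      have hmodid := PySem.Int.floordiv_mul_add_mod (n - h) (k - 1)
      rw [hq'eq] at hmodid
      have hr'eq : PySem.Int.mod (n - h) (k - 1) = (if 0 < r then r - 1 else 0) := by
        have e1 : q * (k - 1) = q * k - q := by ring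
        rw [hhdef] at hmodid ⊢
        split_ifs at hmodid ⊢ with hrpos <;> omega
      have hrest_sizes : rest = sizesFor (n - h) (k - 1) := by
        rw [hrestdef, sizesFor, hq'eq, hr'eq]
        split_ifs with hrpos
        · congr 2 <;> omega
        · congr 2 <;> omega
      have hihyp := ih (toks.drop h.toNat) (k - 1) (by omega) (by omega)
        (by rw [hlen, hhdef]
            have e3 : 0 ≤ (q - 1) * (k - 1) := mul_nonneg (by omega) (by omega)
            have e4 : (q - 1) * (k - 1) = q * k - q - k + 1 := by ring
            split_ifs with hrpos <;> omega)
      rw [hrest_sizes, ← hlen]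
      exact hihyp

-- B returns the padded-empty answer whenever there are no tokens
lemma alt_of_no_tokens (source : String) (target_count : Int)
    (h : PySem.Str.split₀ source = []) :
    split_source_by_whitespace_and_align_alt source target_count = List.replicate target_count.toNat "" := by
  unfold split_source_by_whitespace_and_align_alt
  rw [h]
  simp only [List.length_nil, Nat.cast_zero]
  by_cases ht : (0 : Int) ≤ target_count
  · rw [if_pos ht]
    simp
  · rw [if_neg ht]
    rw [pvPeel, dif_pos (by omega)]
    simp [show target_count.toNat = 0 by omega]

-- ===== VERDICT (by name: the statement is the Claim_ definition above) =====
theorem split_source_by_whitespace_and_align_spec : Claim_equal_split_source_by_whitespace_and_align := by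
  intro source t _hDom hPre
  unfold Spec_split_source_by_whitespace_and_align
  unfold split_source_by_whitespace_and_align
  by_cases hs : PySem.Str.strip source = ""
  · rw [if_pos hs, alt_of_no_tokens source t (split₀_of_strip_empty source hs)]
  · rw [if_neg hs]
    by_cases htok : PySem.Str.split₀ source = []
    · rw [alt_of_no_tokens source t htok]
      simp [htok]
    · rw [if_neg htok]
      by_cases hle : ((PySem.Str.split₀ source).length : Int) ≤ t
      · rw [if_pos hle]
        unfold split_source_by_whitespace_and_align_alt
        rw [if_pos hle]
      · rw [if_neg hle]
        unfold split_source_by_whitespace_and_align_alt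
        rw [if_neg hle]
        by_cases ht : 0 < t
        · set tokens := PySem.Str.split₀ source with htokens
          have hr0 : 0 ≤ PySem.Int.mod (tokens.length : Int) t := PySem.Int.mod_nonneg _ ht
          have hrt : PySem.Int.mod (tokens.length : Int) t ≤ t := le_of_lt (PySem.Int.mod_lt _ ht)
          simp only
          have hA := a_loop_eq_chunks tokens (PySem.Int.floordiv (tokens.length : Int) t)
            (PySem.Int.mod (tokens.length : Int) t) t 0 [] 0
          rw [sizes_eq_map_range _ _ _ hr0 hrt] at hA
          rw [hA]
          rw [peel_eq_chunks t.toNat tokens t rfl ht (by omega)]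
          rw [sizesFor]
          simp
        · have htne : t ≠ 0 := by
            rcases hPre with h | h
            · exact h
            · exact absurd h hs
          have htn : t < 0 := by omega
          rw [pvPeel, dif_pos (by omega)]
          simp [PySem.List.pyRange_one_eq_nil (le_of_lt htn)]
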